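-- pv_equiv track=rewrite | github.com/jakuberich/cpp_exercise_checker | untar_and_make.py | filter_specific_warning
-- ===== SOURCE A (Python) =====
-- def filter_specific_warning(text):
--     """
--     Filters out the specific CMake deprecation warning regarding compatibility with CMake < 3.5.
--     Only removes the block of text associated with that warning, leaving other warnings intact.
--     """
--     lines = text.splitlines(keepends=True)
--     filtered_lines = []
--     skip = False
--     for line in lines:
--         if not skip and "CMake Deprecation Warning" in line and "cmake_minimum_required" in line:
--             skip = True
--             continue
--         if skip:
--             if line.startswith("  ") or line.strip() == "":
--                 continue
--             else:
--                 skip = False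
--         filtered_lines.append(line)
--     return "".join(filtered_lines)
-- ===== SOURCE B (Python) =====
-- def filter_specific_warning(text):
--     """Same filtering by search-and-slice: find the next header line, keep the
--     whole prefix before it as one slice, slice past the indented/blank block,
--     emit the terminator slice, and continue on the remaining suffix."""
--     lines = text.splitlines(keepends=True)
--     chunks = []
--     rest = lines
--     while True:
--         for h, line in enumerate(rest):
--             if "CMake Deprecation Warning" in line and "cmake_minimum_required" in line:
--                 break
--         else:
--             chunks.append(rest)
--             break
--         chunks.append(rest[:h])
--         j = h + 1
--         while j < len(rest) and (rest[j].startswith("  ") or rest[j].strip() == ""):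
--             j += 1
--         chunks.append(rest[j:j + 1])  # terminator line (empty slice at EOF), not re-tested
--         rest = rest[j + 1:]
--     return "".join(line for chunk in chunks for line in chunk)
-- ===== Notes on version B (the rewrite author's own statement) =====
-- stated objective: alternative
-- what changed: Replaces A's per-line skip-flag state machine with a search-and-slice scheme: find the index of the next header line, keep the preceding lines as one slice, slice past the indented/blank block, emit the terminator slice, and recurse on the remaining suffix.
import Mathlib
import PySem

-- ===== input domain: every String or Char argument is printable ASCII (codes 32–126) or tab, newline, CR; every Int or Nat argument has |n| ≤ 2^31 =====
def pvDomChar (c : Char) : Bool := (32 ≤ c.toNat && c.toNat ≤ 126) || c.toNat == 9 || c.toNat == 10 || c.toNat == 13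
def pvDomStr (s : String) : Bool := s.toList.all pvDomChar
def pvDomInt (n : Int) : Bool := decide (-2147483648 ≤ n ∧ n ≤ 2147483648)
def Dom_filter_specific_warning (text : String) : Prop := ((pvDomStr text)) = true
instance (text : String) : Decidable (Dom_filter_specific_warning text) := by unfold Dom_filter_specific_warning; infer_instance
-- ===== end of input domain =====

-- B replaces A's per-line skip-flag state machine by a search-and-slice scheme over whole
-- chunks of lines (objective: alternative decomposition, same cost).

-- text.splitlines(keepends=True): on the Dom alphabet (printable ASCII + tab + '\n' + '\r')
-- the only line boundaries are '\n', '\r\n' and '\r' — exact there.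
def pvSplitKeep (acc : List Char) : List Char → List (List Char)
  | [] => if acc.isEmpty = true then [] else [acc.reverse]
  | '\r' :: '\n' :: rest => (acc.reverse ++ ['\r', '\n']) :: pvSplitKeep [] rest
  | '\r' :: rest => (acc.reverse ++ ['\r']) :: pvSplitKeep [] rest
  | '\n' :: rest => (acc.reverse ++ ['\n']) :: pvSplitKeep [] rest
  | c :: rest => pvSplitKeep (c :: acc) rest

-- "CMake Deprecation Warning" in line and "cmake_minimum_required" in line
def pvIsHeader (l : List Char) : Bool :=
  PySem.Chars.isIn "CMake Deprecation Warning".toList l &&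
  PySem.Chars.isIn "cmake_minimum_required".toList l

-- line.startswith("  ") or line.strip() == ""
def pvIsCont (l : List Char) : Bool :=
  PySem.Chars.startswith l "  ".toList || (PySem.Chars.strip l == ([] : List Char))

-- ===== PORT A =====
-- A's single for-loop with the 'skip' boolean, transliterated line by line.
def pvGoA (skip : Bool) : List (List Char) → List (List Char)
  | [] => []
  | line :: rest =>
    if !skip && pvIsHeader line then pvGoA true rest
    else if skip then
      if pvIsCont line then pvGoA true rest
      else line :: pvGoA false rest
    else line :: pvGoA false rest

def filter_specific_warning (text : String) : String :=
  String.ofList (PySem.Chars.join [] (pvGoA false (pvSplitKeep [] text.toList)))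

-- ===== PORT B =====
-- B's search-and-slice loop: 'rest.takeWhile (¬header)' is the prefix chunk rest[:h],
-- 'rest.dropWhile (¬header)' the suffix from the header; the block is sliced off with
-- dropWhile pvIsCont and the terminator slice rest[j:j+1] emitted without re-testing.
def pvGoB (ls : List (List Char)) : List (List Char) :=
  match h : ls.dropWhile (fun l => !pvIsHeader l) with
  | [] => ls
  | _hdr :: tail =>
    match h2 : tail.dropWhile pvIsCont with
    | [] => ls.takeWhile (fun l => !pvIsHeader l)
    | t :: rest' => ls.takeWhile (fun l => !pvIsHeader l) ++ t :: pvGoB rest'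
termination_by ls.length
decreasing_by
  have h1 : (ls.dropWhile (fun l => !pvIsHeader l)).length ≤ ls.length :=
    List.length_dropWhile_le _ _
  have h2' : (tail.dropWhile pvIsCont).length ≤ tail.length := List.length_dropWhile_le _ _
  rw [h] at h1; rw [h2] at h2'
  simp at h1 h2'; omega

def filter_specific_warning_alt (text : String) : String :=
  String.ofList (PySem.Chars.join [] (pvGoB (pvSplitKeep [] text.toList)))

-- ===== PRECONDITION & SPEC =====
def Spec_filter_specific_warning (text : String) (out : String) : Prop := out = filter_specific_warning_alt text
instance (text : String) (out : String) : Decidable (Spec_filter_specific_warning text out) := by unfold Spec_filter_specific_warning; infer_instance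

-- ===== CLAIM (what is proved, stated in full; the proofs are below) =====
def Claim_equal_filter_specific_warning : Prop := ∀ (text : String), Dom_filter_specific_warning text → Spec_filter_specific_warning text (filter_specific_warning text)

-- ===== LEMMAS AND PROOFS =====

-- A with skip=false keeps every non-header line unchanged.
theorem pvGoA_of_no_header (ls : List (List Char)) (h : ∀ l ∈ ls, pvIsHeader l = false) :
    pvGoA false ls = ls := by
  induction ls with
  | nil => rfl
  | cons l r ih =>
    have hl := h l (by simp)
    simp [pvGoA, hl, ih fun x hx => h x (by simp [hx])]

-- A with skip=false passes over a prefix of non-header lines unchanged.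
theorem pvGoA_append (pre rest : List (List Char)) (h : ∀ l ∈ pre, pvIsHeader l = false) :
    pvGoA false (pre ++ rest) = pre ++ pvGoA false rest := by
  induction pre with
  | nil => rfl
  | cons l r ih =>
    have hl := h l (by simp)
    simp [pvGoA, hl, ih fun x hx => h x (by simp [hx])]

-- A in skip-mode drops continuation lines and then emits the next line with skip cleared:
-- exactly B's slice past the block followed by the terminator slice.
theorem pvGoA_true_eq (rest : List (List Char)) :
    pvGoA true rest =
      match rest.dropWhile pvIsCont with
      | [] => []
      | t :: r => t :: pvGoA false r := by
  induction rest with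
  | nil => rfl
  | cons l r ih =>
    by_cases hc : pvIsCont l = true
    · simp [pvGoA, pvIsHeader, hc, ih]
    · simp [pvGoA, pvIsHeader, hc]

theorem pvGoA_eq_pvGoB (ls : List (List Char)) : pvGoA false ls = pvGoB ls := by
  have key : ∀ n (ls : List (List Char)), ls.length ≤ n → pvGoA false ls = pvGoB ls := by
    intro n
    induction n with
    | zero =>
      intro ls h
      have he : ls = [] := List.length_eq_zero_iff.mp (Nat.le_zero.mp h)
      subst he; rw [pvGoB]; rfl
    | succ n ih =>
      intro ls hlen
      have hpre : ∀ l ∈ ls.takeWhile (fun l => !pvIsHeader l), pvIsHeader l = false := by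
        intro l hl
        have := List.mem_takeWhile_imp hl
        simpa using this
      rw [pvGoB]
      split
      · rename_i hd
        exact pvGoA_of_no_header ls (fun l hl => by
          simpa using (List.dropWhile_eq_nil_iff.mp hd l hl))
      · rename_i hdr tail hd
        have hsplit : ls.takeWhile (fun l => !pvIsHeader l) ++ ls.dropWhile (fun l => !pvIsHeader l) = ls :=
          List.takeWhile_append_dropWhile
        have hhdr : pvIsHeader hdr = true := by
          have hne : ls.dropWhile (fun l => !pvIsHeader l) ≠ [] := by rw [hd]; simp
          have h0 := List.head_dropWhile_not (p := fun l => !pvIsHeader l) (l := ls) hne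
          have he : (ls.dropWhile (fun l => !pvIsHeader l)).head hne = hdr := by simp [hd]
          rw [he] at h0; simpa using h0
        have hA : pvGoA false (hdr :: tail) = pvGoA true tail := by
          simp [pvGoA, hhdr]
        have hlen1 : (ls.dropWhile (fun l => !pvIsHeader l)).length ≤ ls.length :=
          List.length_dropWhile_le _ _
        rw [hd] at hlen1; simp only [List.length_cons] at hlen1
        conv_lhs => rw [← hsplit, hd]
        rw [pvGoA_append _ _ hpre, hA, pvGoA_true_eq]
        split
        · rename_i hd2
          rw [hd2]; simp
        · rename_i t rest' hd2
          have hlen2 : (tail.dropWhile pvIsCont).length ≤ tail.length :=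
            List.length_dropWhile_le _ _
          rw [hd2] at hlen2; simp only [List.length_cons] at hlen2
          rw [hd2, ih rest' (by omega)]
  exact key ls.length ls le_rfl

-- ===== VERDICT (by name: the statement is the Claim_ definition above) =====
theorem filter_specific_warning_spec : Claim_equal_filter_specific_warning := by
  intro text _
  unfold Spec_filter_specific_warning filter_specific_warning filter_specific_warning_alt
  rw [pvGoA_eq_pvGoB]
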